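-- pv_equiv track=rewrite | github.com/downingbots/ALSET_analysis | analyze_box.py | findparallel
-- ===== SOURCE A (Python) =====
-- def findparallel(lines, allowed_delta):
--   lines1 = []
--   for i in range(len(lines)):
--     for j in range(len(lines)):
--         if (i == j):continue
--         if abs(lines[i][1] - lines[j][1]) <= allowed_delta:
--              # You've found a parallel line!
--              lines1.append((i,j))
--   return lines1
-- ===== SOURCE B (Python) =====
-- def _lower(sv, x):
--     # first index k with sv[k] >= x, on a non-decreasing list (hand-written binary search)
--     lo, hi = 0, len(sv)
--     while lo < hi:
--         mid = (lo + hi) // 2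
--         if sv[mid] < x:
--             lo = mid + 1
--         else:
--             hi = mid
--     return lo
--
-- def findparallel(lines, allowed_delta):
--     n = len(lines)
--     order = sorted(range(n), key=lambda k: lines[k][1])
--     sv = [lines[k][1] for k in order]
--     out = []
--     for i in range(n):
--         v = lines[i][1]
--         lo = _lower(sv, v - allowed_delta)
--         hi = _lower(sv, v + allowed_delta + 1)
--         for j in sorted(order[lo:hi]):
--             if j != i:
--                 out.append((i, j))
--     return out
-- ===== Notes on version B (the rewrite author's own statement) =====
-- stated objective: alternative
-- what changed: Replaces A's all-pairs double scan with one sort of the indices by value plus a hand-written binary search that finds each element's [v-delta, v+delta] window, emitting the window's partner indices in sorted order.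
import Mathlib
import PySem

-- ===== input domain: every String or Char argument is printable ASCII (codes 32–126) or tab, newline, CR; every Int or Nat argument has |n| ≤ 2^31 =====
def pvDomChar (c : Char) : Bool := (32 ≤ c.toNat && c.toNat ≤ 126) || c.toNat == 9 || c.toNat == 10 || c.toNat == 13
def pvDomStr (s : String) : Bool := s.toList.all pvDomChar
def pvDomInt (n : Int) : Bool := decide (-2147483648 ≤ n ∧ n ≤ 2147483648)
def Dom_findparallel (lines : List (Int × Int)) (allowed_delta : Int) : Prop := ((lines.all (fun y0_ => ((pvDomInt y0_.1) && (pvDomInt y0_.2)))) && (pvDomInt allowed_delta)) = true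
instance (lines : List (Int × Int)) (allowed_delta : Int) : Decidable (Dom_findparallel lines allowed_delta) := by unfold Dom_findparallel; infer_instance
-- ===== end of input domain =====

-- B replaces A's all-pairs double scan by one sort of the indices by value plus a
-- binary-searched delta window per element (objective: alternative algorithm).

-- ===== PORT A =====
def findparallel (lines : List (Int × Int)) (allowed_delta : Int) : List (Int × Int) :=
  (PySem.List.pyRange 0 (PySem.List.len lines) 1).foldl (fun lines1 i =>
    (PySem.List.pyRange 0 (PySem.List.len lines) 1).foldl (fun lines1 j =>
      if i == j then lines1
      else if |(PySem.List.pyGetD lines i (0, 0)).2 - (PySem.List.pyGetD lines j (0, 0)).2| ≤ allowed_delta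
      then lines1 ++ [(i, j)]
      else lines1) lines1) []

-- ===== PORT B =====
-- hand-written binary search from Source B (`_lower`): first index k with sv[k] ≥ x on a
-- non-decreasing sv; `sv.getD mid 0` is exact for Python's sv[mid], which is always in range here
def lbLoop (sv : List Int) (x : Int) (lo hi : Nat) : Nat :=
  if _h : lo < hi then
    let mid := (lo + hi) / 2
    if sv.getD mid 0 < x then lbLoop sv x (mid + 1) hi
    else lbLoop sv x lo mid
  else lo
termination_by hi - lo
decreasing_by all_goals omega

def lowerB (sv : List Int) (x : Int) : Nat := lbLoop sv x 0 sv.length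

def findparallel_alt (lines : List (Int × Int)) (allowed_delta : Int) : List (Int × Int) :=
  let n := PySem.List.len lines
  let order := PySem.List.sorted (PySem.List.pyRange 0 n 1)
    (fun k => (PySem.List.pyGetD lines k (0, 0)).2)
  let sv := order.map (fun k => (PySem.List.pyGetD lines k (0, 0)).2)
  (PySem.List.pyRange 0 n 1).foldl (fun out i =>
    let v := (PySem.List.pyGetD lines i (0, 0)).2
    let lo := lowerB sv (v - allowed_delta)
    let hi := lowerB sv (v + allowed_delta + 1)
    (PySem.List.sorted (PySem.List.slice order (some (lo : Int)) (some (hi : Int)))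
        (fun j => j)).foldl
      (fun out j => if j ≠ i then out ++ [(i, j)] else out) out) []

-- ===== PRECONDITION & SPEC =====
def Spec_findparallel (lines : List (Int × Int)) (allowed_delta : Int) (out : List (Int × Int)) : Prop := out = findparallel_alt lines allowed_delta
instance (lines : List (Int × Int)) (allowed_delta : Int) (out : List (Int × Int)) : Decidable (Spec_findparallel lines allowed_delta out) := by unfold Spec_findparallel; infer_instance

-- ===== CLAIM (what is proved, stated in full; the proofs are below) =====
def Claim_equal_findparallel : Prop := ∀ (lines : List (Int × Int)) (allowed_delta : Int), Dom_findparallel lines allowed_delta → Spec_findparallel lines allowed_delta (findparallel lines allowed_delta)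

-- ===== LEMMAS AND PROOFS =====

-- value of line k, as both ports read it
def pvVal (lines : List (Int × Int)) (k : Int) : Int := (PySem.List.pyGetD lines k (0, 0)).2

-- A's inner loop accumulates a filtered map
theorem innerA_eq (lines : List (Int × Int)) (d i : Int) (l : List Int) (acc : List (Int × Int)) :
    l.foldl (fun acc j =>
      if i == j then acc
      else if |pvVal lines i - pvVal lines j| ≤ d then acc ++ [(i, j)] else acc) acc
    = acc ++ (l.filter (fun j => !(i == j) && decide (|pvVal lines i - pvVal lines j| ≤ d))).map
        (fun j => (i, j)) := by
  induction l generalizing acc with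
  | nil => simp
  | cons x xs ih =>
    rw [List.foldl_cons]
    by_cases hx : i = x
    · rw [if_pos (by simpa using hx), ih]
      simp [hx]
    · rw [if_neg (by simpa using hx)]
      by_cases hc : |pvVal lines i - pvVal lines x| ≤ d
      · rw [if_pos hc, ih]
        simp [hx, hc]
      · rw [if_neg hc, ih]
        simp [hc]

-- B's inner loop accumulates a filtered map
theorem innerB_eq (i : Int) (l : List Int) (acc : List (Int × Int)) :
    l.foldl (fun out j => if j ≠ i then out ++ [(i, j)] else out) acc
    = acc ++ (l.filter (fun j => decide (j ≠ i))).map (fun j => (i, j)) := by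
  induction l generalizing acc with
  | nil => simp
  | cons x xs ih =>
    rw [List.foldl_cons]
    by_cases hx : x = i
    · rw [if_neg (by simp [hx]), ih]
      simp [hx]
    · rw [if_pos hx, ih]
      simp [hx]

-- specification of the hand-written binary search
theorem lbLoop_spec (sv : List Int) (x : Int) (lo hi : Nat)
    (hle : lo ≤ hi) (hhi : hi ≤ sv.length) (hsv : sv.Pairwise (· ≤ ·))
    (hlo : ∀ k, k < lo → k < sv.length → sv.getD k 0 < x)
    (hup : ∀ k, hi ≤ k → k < sv.length → x ≤ sv.getD k 0) :
    lbLoop sv x lo hi ≤ sv.length ∧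
      (∀ k, k < lbLoop sv x lo hi → k < sv.length → sv.getD k 0 < x) ∧
      (∀ k, lbLoop sv x lo hi ≤ k → k < sv.length → x ≤ sv.getD k 0) := by
  induction lo, hi using lbLoop.induct sv x with
  | case1 lo hi h mid hmid ih =>
    rw [lbLoop]
    simp only [dif_pos h]
    rw [show ((lo + hi) / 2) = mid from rfl] at *
    simp only [if_pos hmid]
    refine ih (by omega) (by omega) ?_ hup
    intro k hk hklen
    have hmlen : mid < sv.length := by omega
    have : sv.getD k 0 ≤ sv.getD mid 0 := by
      rcases Nat.lt_or_ge k mid with hlt | hge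
      · have := (List.pairwise_iff_getElem.mp hsv) k mid hklen hmlen hlt
        simpa [List.getD_eq_getElem?_getD, List.getElem?_eq_getElem hklen,
          List.getElem?_eq_getElem hmlen] using this
      · have : k = mid := by omega
        simp [this]
    omega
  | case2 lo hi h mid hmid ih =>
    rw [lbLoop]
    simp only [dif_pos h]
    rw [show ((lo + hi) / 2) = mid from rfl] at *
    simp only [if_neg hmid]
    refine ih (by omega) (by omega) hlo ?_
    intro k hk hklen
    have hmlen : mid < sv.length := by omega
    have : sv.getD mid 0 ≤ sv.getD k 0 := by
      rcases Nat.lt_or_ge mid k with hlt | hge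
      · have := (List.pairwise_iff_getElem.mp hsv) mid k hmlen hklen hlt
        simpa [List.getD_eq_getElem?_getD, List.getElem?_eq_getElem hklen,
          List.getElem?_eq_getElem hmlen] using this
      · have : mid = k := by omega
        simp [this]
    omega
  | case3 lo hi h =>
    rw [lbLoop]
    simp only [dif_neg h]
    exact ⟨by omega, fun k hk hklen => hlo k (by omega) hklen, fun k hk hklen => hup k (by omega) hklen⟩

theorem lowerB_spec (sv : List Int) (x : Int) (hsv : sv.Pairwise (· ≤ ·)) :
    lowerB sv x ≤ sv.length ∧
      (∀ k, k < lowerB sv x → k < sv.length → sv.getD k 0 < x) ∧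
      (∀ k, lowerB sv x ≤ k → k < sv.length → x ≤ sv.getD k 0) :=
  lbLoop_spec sv x 0 sv.length (Nat.zero_le _) le_rfl hsv (by omega) (by omega)

-- membership in a drop/take window
theorem mem_drop_take (l : List Int) (a b : Nat) (j : Int) :
    j ∈ (l.drop a).take (b - a) ↔ ∃ (k : Nat) (_ : k < l.length), a ≤ k ∧ k < b ∧ l[k] = j := by
  constructor
  · intro h
    rw [List.mem_iff_getElem] at h
    obtain ⟨m, hm, he⟩ := h
    simp [List.length_take, List.length_drop] at hm
    refine ⟨a + m, by omega, by omega, by omega, ?_⟩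
    rw [List.getElem_take, List.getElem_drop] at he
    exact he
  · rintro ⟨k, hk, hak, hkb, he⟩
    rw [List.mem_iff_getElem]
    refine ⟨k - a, ?_, ?_⟩
    · simp [List.length_take, List.length_drop]; omega
    · rw [List.getElem_take, List.getElem_drop]
      have : a + (k - a) = k := by omega
      simp [this, he]

-- the heart: the sorted binary-search window equals the range filtered by the delta test
theorem window_eq (lines : List (Int × Int)) (d i : Int) :
    (let n := PySem.List.len lines
     let order := PySem.List.sorted (PySem.List.pyRange 0 n 1) (fun k => pvVal lines k)
     let sv := order.map (fun k => pvVal lines k)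
     PySem.List.sorted (PySem.List.slice order (some ((lowerB sv (pvVal lines i - d) : Nat) : Int))
        (some ((lowerB sv (pvVal lines i + d + 1) : Nat) : Int))) (fun j => j))
    = (PySem.List.pyRange 0 (PySem.List.len lines) 1).filter
        (fun j => decide (|pvVal lines i - pvVal lines j| ≤ d)) := by
  simp only
  set n := PySem.List.len lines with hn
  set key := fun k => pvVal lines k with hkey
  set order := PySem.List.sorted (PySem.List.pyRange 0 n 1) key with horder
  set sv := order.map key with hsv
  set lo := lowerB sv (pvVal lines i - d) with hlo
  set hi := lowerB sv (pvVal lines i + d + 1) with hhi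
  have hperm : order.Perm (PySem.List.pyRange 0 n 1) := PySem.List.sorted_perm _ _ _
  have hnodup : order.Nodup := hperm.symm.nodup (PySem.List.nodup_pyRange_one 0 n)
  have hordpw : order.Pairwise (fun a b => key a ≤ key b) := PySem.List.sorted_pairwise _ _
  have hsvpw : sv.Pairwise (· ≤ ·) := by
    rw [hsv]; exact List.Pairwise.map key (fun a b h => h) hordpw
  have hlen : sv.length = order.length := by rw [hsv]; exact List.length_map ..
  have hspec1 := lowerB_spec sv (pvVal lines i - d) hsvpw
  have hspec2 := lowerB_spec sv (pvVal lines i + d + 1) hsvpw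
  have hsvget : ∀ (k : Nat) (hk : k < order.length), sv.getD k 0 = key order[k] := by
    intro k hk
    have hk' : k < sv.length := by omega
    rw [List.getD_eq_getElem?_getD, List.getElem?_eq_getElem hk']
    simp [hsv]
  -- characterise window membership
  have hwin : ∀ j : Int, j ∈ (order.drop lo).take (hi - lo) ↔
      (j ∈ PySem.List.pyRange 0 n 1 ∧ |pvVal lines i - pvVal lines j| ≤ d) := by
    intro j
    rw [mem_drop_take]
    constructor
    · rintro ⟨k, hk, hlok, hkhi, he⟩
      have h1 := hspec1.2.2 k hlok (by omega)
      have h2 := hspec2.2.1 k hkhi (by omega)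
      rw [hsvget k hk, he] at h1 h2
      have hjo : j ∈ order := by rw [← he]; exact List.getElem_mem hk
      refine ⟨hperm.mem_iff.mp hjo, ?_⟩
      rw [abs_le]
      constructor <;> [skip; skip] <;> simp only [hkey] at h1 h2 <;> omega
    · rintro ⟨hjmem, hjd⟩
      have hjo : j ∈ order := hperm.mem_iff.mpr hjmem
      obtain ⟨k, hk, he⟩ := List.mem_iff_getElem.mp hjo
      have habs := abs_le.mp hjd
      refine ⟨k, hk, ?_, ?_, he⟩
      · by_contra hcon
        have := hspec1.2.1 k (by omega) (by omega)
        rw [hsvget k hk, he] at this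
        simp only [hkey] at this; omega
      · by_contra hcon
        have := hspec2.2.2 k (by omega) (by omega)
        rw [hsvget k hk, he] at this
        simp only [hkey] at this; omega
  -- the filtered range is a strictly increasing rearrangement of the window
  have hWnodup : ((PySem.List.pyRange 0 n 1).filter
      (fun j => decide (|pvVal lines i - pvVal lines j| ≤ d))).Nodup :=
    (PySem.List.nodup_pyRange_one 0 n).filter _
  have hwnodup : ((order.drop lo).take (hi - lo)).Nodup :=
    hnodup.sublist ((List.take_sublist _ _).trans (List.drop_sublist _ _))
  have hpermW : ((PySem.List.pyRange 0 n 1).filter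
      (fun j => decide (|pvVal lines i - pvVal lines j| ≤ d))).Perm
      ((order.drop lo).take (hi - lo)) := by
    refine (List.perm_ext_iff_of_nodup hWnodup hwnodup).mpr ?_
    intro a
    rw [hwin a, List.mem_filter]
    simp
  have hWpw : ((PySem.List.pyRange 0 n 1).filter
      (fun j => decide (|pvVal lines i - pvVal lines j| ≤ d))).Pairwise (· < ·) :=
    (PySem.List.pairwise_lt_pyRange_one 0 n).filter _
  rw [PySem.List.slice_natCast]
  exact PySem.List.sorted_eq_of_perm_of_pairwise_lt _ _ _ hpermW hWpw

-- ===== VERDICT (by name: the statement is the Claim_ definition above) =====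
theorem findparallel_spec : Claim_equal_findparallel := by
  intro lines d _
  unfold Spec_findparallel findparallel findparallel_alt
  simp only []
  -- rewrite both outer folds into flatMaps of per-i blocks
  have hA : ∀ acc : List (Int × Int),
      (PySem.List.pyRange 0 (PySem.List.len lines) 1).foldl (fun lines1 i =>
        (PySem.List.pyRange 0 (PySem.List.len lines) 1).foldl (fun lines1 j =>
          if i == j then lines1
          else if |(PySem.List.pyGetD lines i (0, 0)).2 - (PySem.List.pyGetD lines j (0, 0)).2| ≤ d
          then lines1 ++ [(i, j)] else lines1) lines1) acc
      = acc ++ (PySem.List.pyRange 0 (PySem.List.len lines) 1).flatMap (fun i =>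
          ((PySem.List.pyRange 0 (PySem.List.len lines) 1).filter
            (fun j => !(i == j) && decide (|pvVal lines i - pvVal lines j| ≤ d))).map
            (fun j => (i, j))) := by
    intro acc
    rw [← PySem.List.foldl_append_eq_flatMap]
    refine PySem.List.foldl_congr_mem _ _ _ _ ?_
    intro a i _
    exact innerA_eq lines d i _ a
  have hB : ∀ acc : List (Int × Int),
      (PySem.List.pyRange 0 (PySem.List.len lines) 1).foldl (fun out i =>
        (PySem.List.sorted (PySem.List.slice
            (PySem.List.sorted (PySem.List.pyRange 0 (PySem.List.len lines) 1)
              (fun k => (PySem.List.pyGetD lines k (0, 0)).2))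
            (some ((lowerB ((PySem.List.sorted (PySem.List.pyRange 0 (PySem.List.len lines) 1)
              (fun k => (PySem.List.pyGetD lines k (0, 0)).2)).map
                (fun k => (PySem.List.pyGetD lines k (0, 0)).2))
              ((PySem.List.pyGetD lines i (0, 0)).2 - d) : Nat) : Int))
            (some ((lowerB ((PySem.List.sorted (PySem.List.pyRange 0 (PySem.List.len lines) 1)
              (fun k => (PySem.List.pyGetD lines k (0, 0)).2)).map
                (fun k => (PySem.List.pyGetD lines k (0, 0)).2))
              ((PySem.List.pyGetD lines i (0, 0)).2 + d + 1) : Nat) : Int)))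
          (fun j => j)).foldl
          (fun out j => if j ≠ i then out ++ [(i, j)] else out) out) acc
      = acc ++ (PySem.List.pyRange 0 (PySem.List.len lines) 1).flatMap (fun i =>
          (((PySem.List.pyRange 0 (PySem.List.len lines) 1).filter
              (fun j => decide (|pvVal lines i - pvVal lines j| ≤ d))).filter
            (fun j => decide (j ≠ i))).map (fun j => (i, j))) := by
    intro acc
    rw [← PySem.List.foldl_append_eq_flatMap]
    refine PySem.List.foldl_congr_mem _ _ _ _ ?_
    intro a i _
    rw [innerB_eq]
    congr 2
    have := window_eq lines d i
    simp only [pvVal] at this ⊢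
    rw [this]
  rw [hA, hB]
  simp only [List.nil_append]
  refine List.flatMap_congr ?_
  intro i _
  rw [List.filter_filter]
  refine congrArg _ (List.filter_congr ?_)
  intro j _
  by_cases h : i = j
  · simp [h]
  · simp [h, Ne.symm h]
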